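-- pv_equiv track=rewrite | github.com/AK8963/Langextract_Research | Task2/main.py | _build_ancestry_stack
-- ===== SOURCE A (Python) =====
-- from typing import List, Dict
--
-- def _build_ancestry_stack(ordered_headings_leveled: List[tuple]) -> Dict[str, List[str]]:
--     """Rule-based fallback: build ancestry using a heading stack and key-based levels."""
--     heading_stack = []
--     ancestry_map = {}
--     for h, level in ordered_headings_leveled:
--         while heading_stack and heading_stack[-1][1] >= level:
--             heading_stack.pop()
--         ancestry_map[h] = [item[0] for item in heading_stack]
--         heading_stack.append((h, level))
--     return ancestry_map
-- ===== SOURCE B (Python) =====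
-- from typing import List, Dict
--
-- def _build_ancestry_stack(ordered_headings_leveled: List[tuple]) -> Dict[str, List[str]]:
--     """Parent-pointer re-implementation: no live stack; each heading's parent is the
--     nearest earlier heading with a strictly smaller level, and its ancestry reuses
--     the parent's already-built ancestry."""
--     n = len(ordered_headings_leveled)
--     parent = []
--     for i in range(n):
--         p = None
--         for j in range(i - 1, -1, -1):
--             if ordered_headings_leveled[j][1] < ordered_headings_leveled[i][1]:
--                 p = j
--                 break
--         parent.append(p)
--     ancestry = []
--     ancestry_map = {}
--     for i in range(n):
--         p = parent[i]
--         ancestry.append([] if p is None else ancestry[p] + [ordered_headings_leveled[p][0]])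
--         ancestry_map[ordered_headings_leveled[i][0]] = ancestry[i]
--     return ancestry_map
-- ===== Notes on version B (the rewrite author's own statement) =====
-- stated objective: alternative
-- what changed: Replaces A's live heading stack (pop-while-snapshot per heading) by a two-pass parent-pointer scheme: each heading's parent is the nearest earlier heading with strictly smaller level, found by a backward scan, and each ancestry list is built by reusing the parent's already-built ancestry.
import Mathlib
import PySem

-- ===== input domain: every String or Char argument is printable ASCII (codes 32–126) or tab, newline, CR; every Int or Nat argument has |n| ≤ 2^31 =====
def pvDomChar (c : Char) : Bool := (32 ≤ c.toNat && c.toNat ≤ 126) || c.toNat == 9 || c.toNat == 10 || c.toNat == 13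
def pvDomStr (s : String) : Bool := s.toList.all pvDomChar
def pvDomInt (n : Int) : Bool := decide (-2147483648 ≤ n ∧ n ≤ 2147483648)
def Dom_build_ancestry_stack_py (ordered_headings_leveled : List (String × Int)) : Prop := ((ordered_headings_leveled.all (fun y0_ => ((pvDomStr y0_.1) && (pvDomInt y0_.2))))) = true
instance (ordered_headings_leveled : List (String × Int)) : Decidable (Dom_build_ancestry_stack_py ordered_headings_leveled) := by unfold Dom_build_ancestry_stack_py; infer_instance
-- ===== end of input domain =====

-- B replaces A's live heading stack by parent pointers (nearest earlier heading with a
-- strictly smaller level, found by a backward scan) and reuses each parent's already-built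
-- ancestry list; alternative decomposition, same result.

-- ===== PORT A =====
-- the 'while heading_stack and heading_stack[-1][1] >= level: heading_stack.pop()' loop;
-- the stack is kept head-first (head = Python's heading_stack[-1])
def popLoopA (level : Int) : List (String × Int) → List (String × Int)
  | [] => []
  | x :: rest => if level ≤ x.2 then popLoopA level rest else x :: rest

def build_ancestry_stack_py (ordered_headings_leveled : List (String × Int)) : List (String × List String) :=
  -- since the stack is head-first, '[item[0] for item in heading_stack]' is (stack.map Prod.fst).reverse
  (ordered_headings_leveled.foldl
    (fun (st : List (String × Int) × PySem.Dict String (List String)) hl =>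
      let stack' := popLoopA hl.2 st.1
      (hl :: stack', st.2.insert hl.1 ((stack'.map Prod.fst).reverse)))
    ([], PySem.Dict.empty)).2.items

-- ===== PORT B =====
-- 'for j in range(i-1, -1, -1): if ohl[j][1] < ohl[i][1]: p = j; break' as downward recursion
def bFindParent (hs : List (String × Int)) (li : Int) : Nat → Option Nat
  | 0 => none
  | j + 1 => if (hs.getD j ("", 0)).2 < li then some j else bFindParent hs li j

def build_ancestry_stack_py_alt (ordered_headings_leveled : List (String × Int)) : List (String × List String) :=
  let hs := ordered_headings_leveled
  let n := hs.length
  let parent := (List.range n).map (fun i => bFindParent hs (hs.getD i ("", 0)).2 i)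
  ((List.range n).foldl
    (fun (st : List (List String) × PySem.Dict String (List String)) i =>
      let a : List String :=
        match parent.getD i none with
        | none => []
        | some p => st.1.getD p [] ++ [(hs.getD p ("", 0)).1]
      (st.1 ++ [a], st.2.insert (hs.getD i ("", 0)).1 a))
    ([], PySem.Dict.empty)).2.items

-- ===== PRECONDITION & SPEC =====
def Spec_build_ancestry_stack_py (ordered_headings_leveled : List (String × Int)) (out : List (String × List String)) : Prop := out = build_ancestry_stack_py_alt ordered_headings_leveled
instance (ordered_headings_leveled : List (String × Int)) (out : List (String × List String)) : Decidable (Spec_build_ancestry_stack_py ordered_headings_leveled out) := by unfold Spec_build_ancestry_stack_py; infer_instance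

-- ===== CLAIM (what is proved, stated in full; the proofs are below) =====
def Claim_equal_build_ancestry_stack_py : Prop := ∀ (ordered_headings_leveled : List (String × Int)), Dom_build_ancestry_stack_py ordered_headings_leveled → Spec_build_ancestry_stack_py ordered_headings_leveled (build_ancestry_stack_py ordered_headings_leveled)

-- ===== LEMMAS AND PROOFS =====

def lvl (hs : List (String × Int)) (i : Nat) : Int := (hs.getD i ("", 0)).2
def nm (hs : List (String × Int)) (i : Nat) : String := (hs.getD i ("", 0)).1
def bP (hs : List (String × Int)) (i : Nat) : Option Nat := bFindParent hs (lvl hs i) i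

theorem bFindParent_lt {hs : List (String × Int)} {t : Int} : ∀ {m j : Nat}, bFindParent hs t m = some j → j < m := by
  intro m
  induction m with
  | zero => intro j h; simp [bFindParent] at h
  | succ k ih =>
    intro j h
    simp only [bFindParent] at h
    split at h
    · cases h; omega
    · exact Nat.lt_trans (ih h) (Nat.lt_succ_self k)

-- the chain of parent pointers (spec object for both proofs)
def chainO (hs : List (String × Int)) : Option Nat → List (String × Int)
  | none => []
  | some i => hs.getD i ("", 0) :: chainO hs (bP hs i)
termination_by o => o.elim 0 (· + 1)
decreasing_by
  rcases h : bP hs i with _ | j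
  · simp
  · simp only [Option.elim]
    exact Nat.succ_lt_succ (bFindParent_lt h)

def anc (hs : List (String × Int)) (i : Nat) : List String := ((chainO hs (bP hs i)).map Prod.fst).reverse

theorem fp_none {hs : List (String × Int)} {t : Int} : ∀ {m : Nat}, bFindParent hs t m = none → ∀ k, k < m → t ≤ lvl hs k := by
  intro m
  induction m with
  | zero => intro _ k hk; omega
  | succ j ih =>
    intro h k hk
    simp only [bFindParent] at h
    split at h
    · cases h
    · rcases Nat.lt_succ_iff_lt_or_eq.mp hk with h' | h'
      · exact ih h k h'
      · subst h'; unfold lvl; omega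

theorem fp_some {hs : List (String × Int)} {t : Int} : ∀ {m j : Nat}, bFindParent hs t m = some j → lvl hs j < t ∧ ∀ k, j < k → k < m → t ≤ lvl hs k := by
  intro m
  induction m with
  | zero => intro j h; simp [bFindParent] at h
  | succ i ih =>
    intro j h
    simp only [bFindParent] at h
    split at h
    · cases h
      refine ⟨by unfold lvl; omega, ?_⟩
      intro k hk1 hk2; omega
    · rcases ih h with ⟨h1, h2⟩
      refine ⟨h1, ?_⟩
      intro k hk1 hk2
      rcases Nat.lt_succ_iff_lt_or_eq.mp hk2 with h' | h'
      · exact h2 k hk1 h'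
      · subst h'; unfold lvl; omega

theorem fp_stable {hs : List (String × Int)} {t : Int} : ∀ {i m : Nat}, m ≤ i → (∀ k, m ≤ k → k < i → t ≤ lvl hs k) → bFindParent hs t i = bFindParent hs t m := by
  intro i
  induction i with
  | zero => intro m hm _; interval_cases m; rfl
  | succ j ih =>
    intro m hm hk
    rcases Nat.lt_succ_iff_lt_or_eq.mp (Nat.lt_succ_of_le hm) with h' | h'
    · have hle : m ≤ j := by omega
      have hj : t ≤ lvl hs j := hk j hle (Nat.lt_succ_self j)
      have : bFindParent hs t (j + 1) = bFindParent hs t j := by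
        simp only [bFindParent]
        rw [if_neg]
        unfold lvl at hj; omega
      rw [this]
      exact ih hle (fun k h1 h2 => hk k h1 (Nat.lt_succ_of_lt h2))
    · subst h'; rfl

theorem popChain_some (hs : List (String × Int)) (t : Int) : ∀ i, popLoopA t (chainO hs (some i)) = chainO hs (bFindParent hs t (i + 1)) := by
  intro i
  induction i using Nat.strong_induction_on with
  | _ i ih =>
    rw [chainO]
    by_cases hc : t ≤ (hs.getD i ("", 0)).2
    · rw [popLoopA, if_pos hc]
      have hfp : bFindParent hs t (i + 1) = bFindParent hs t i := by
        simp only [bFindParent]; rw [if_neg]; omega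
      rw [hfp]
      rcases hb : bP hs i with _ | p
      · -- empty tail: all k < i have lvl hs k ≥ lvl hs i ≥ t
        have hall := fp_none hb
        have : bFindParent hs t i = none := by
          have := fp_stable (Nat.zero_le i) (fun k _ h2 => le_trans hc (hall k h2))
          simpa [bFindParent] using this
        rw [this]
        simp [chainO, popLoopA]
      · have hp := fp_some hb
        have hlt := bFindParent_lt hb
        have : bFindParent hs t i = bFindParent hs t (p + 1) := by
          exact fp_stable hlt (fun k h1 h2 => le_trans hc (hp.2 k h1 h2))
        rw [this]
        exact ih p hlt
    · rw [popLoopA, if_neg hc]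
      have : bFindParent hs t (i + 1) = some i := by
        simp only [bFindParent]; rw [if_pos]; omega
      rw [this, chainO]

-- extension stability: everything below hs.length is unchanged by appending one element
theorem getD_ext {hs : List (String × Int)} {x : String × Int} {i : Nat} (h : i < hs.length) :
    (hs ++ [x]).getD i ("", 0) = hs.getD i ("", 0) := by
  simp [List.getD, List.getElem?_append_left h]

theorem fp_ext {hs : List (String × Int)} {x : String × Int} {t : Int} : ∀ {m : Nat}, m ≤ hs.length → bFindParent (hs ++ [x]) t m = bFindParent hs t m := by
  intro m
  induction m with
  | zero => intro _; rfl
  | succ j ih =>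
    intro hm
    simp only [bFindParent]
    rw [getD_ext (by omega), ih (by omega)]

theorem bP_ext {hs : List (String × Int)} {x : String × Int} {i : Nat} (h : i < hs.length) :
    bP (hs ++ [x]) i = bP hs i := by
  unfold bP lvl
  rw [getD_ext h, fp_ext (Nat.le_of_lt h)]

theorem chain_ext (hs : List (String × Int)) (x : String × Int) : ∀ i, i < hs.length → chainO (hs ++ [x]) (some i) = chainO hs (some i) := by
  intro i
  induction i using Nat.strong_induction_on with
  | _ i ih =>
    intro hi
    rw [chainO, chainO, getD_ext hi, bP_ext hi]
    rcases hb : bP hs i with _ | p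
    · rw [chainO, chainO]
    · exact congrArg _ (ih p (bFindParent_lt hb) (Nat.lt_trans (bFindParent_lt hb) hi))

theorem anc_ext {hs : List (String × Int)} {x : String × Int} {i : Nat} (h : i < hs.length) :
    anc (hs ++ [x]) i = anc hs i := by
  unfold anc
  rw [bP_ext h]
  rcases hb : bP hs i with _ | p
  · simp [chainO]
  · rw [chain_ext hs x p (Nat.lt_trans (bFindParent_lt hb) h)]

def topO : Nat → Option Nat
  | 0 => none
  | m + 1 => some m

-- characterisation of A's fold state
theorem A_master (hs : List (String × Int)) :
    hs.foldl
      (fun (st : List (String × Int) × PySem.Dict String (List String)) hl =>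
        let stack' := popLoopA hl.2 st.1
        (hl :: stack', st.2.insert hl.1 ((stack'.map Prod.fst).reverse)))
      ([], PySem.Dict.empty)
    = (chainO hs (topO hs.length),
       (List.range hs.length).foldl (fun d i => d.insert (nm hs i) (anc hs i)) PySem.Dict.empty) := by
  induction hs using List.reverseRecOn with
  | nil => simp [chainO, topO]
  | append_singleton hs x ih =>
    rw [List.foldl_append, ih]
    simp only [List.foldl_cons, List.foldl_nil]
    have hn : (hs ++ [x]).length = hs.length + 1 := by simp
    have hpop : popLoopA x.2 (chainO hs (topO hs.length)) = chainO hs (bFindParent hs x.2 hs.length) := by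
      cases hl : hs.length with
      | zero => simp [topO, chainO, popLoopA, bFindParent]
      | succ m => rw [topO]; exact popChain_some hs x.2 m
    have hbp : bP (hs ++ [x]) hs.length = bFindParent hs x.2 hs.length := by
      unfold bP lvl
      have : (hs ++ [x]).getD hs.length ("", 0) = x := by
        simp [List.getD]
      rw [this, fp_ext (Nat.le_refl _)]
    have hchain_new : ∀ o, o = bFindParent hs x.2 hs.length → chainO (hs ++ [x]) o = chainO hs o := by
      intro o ho
      rcases o with _ | p
      · rw [chainO, chainO]
      · exact chain_ext hs x p (bFindParent_lt ho.symm)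
    have hcong : (List.range hs.length).foldl (fun d i => d.insert (nm (hs ++ [x]) i) (anc (hs ++ [x]) i)) PySem.Dict.empty
        = (List.range hs.length).foldl
            (fun (d : PySem.Dict String (List String)) i => d.insert (nm hs i) (anc hs i)) PySem.Dict.empty := by
      apply PySem.List.foldl_congr_mem
      intro d i hi
      have hi' : i < hs.length := List.mem_range.mp hi
      rw [show nm (hs ++ [x]) i = nm hs i by unfold nm; rw [getD_ext hi'], anc_ext hi']
    refine Prod.ext ?_ ?_
    · -- stack component
      dsimp only
      rw [hn, topO, chainO, hbp, hpop]
      have hget : (hs ++ [x]).getD hs.length ("", 0) = x := by simp [List.getD]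
      rw [hget, hchain_new _ rfl]
    · -- dict component
      dsimp only
      rw [hn, List.range_succ, List.foldl_append, List.foldl_cons, List.foldl_nil, hcong]
      congr 1
      · unfold nm
        simp [List.getD]
      · rw [hpop]
        unfold anc
        rw [hbp, hchain_new _ rfl]

-- characterisation of B's fold state
theorem getD_map_range {α : Type} (f : Nat → α) {m n : Nat} (h : m < n) (d : α) :
    ((List.range n).map f).getD m d = f m := by
  simp [List.getD, h]

theorem B_master (hs : List (String × Int)) : ∀ m, m ≤ hs.length →
    (List.range m).foldl
      (fun (st : List (List String) × PySem.Dict String (List String)) i =>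
        let a : List String :=
          match ((List.range hs.length).map (fun i => bFindParent hs (hs.getD i ("", 0)).2 i)).getD i none with
          | none => []
          | some p => st.1.getD p [] ++ [(hs.getD p ("", 0)).1]
        (st.1 ++ [a], st.2.insert (hs.getD i ("", 0)).1 a))
      ([], PySem.Dict.empty)
    = ((List.range m).map (anc hs),
       (List.range m).foldl (fun d i => d.insert (nm hs i) (anc hs i)) PySem.Dict.empty) := by
  intro m
  induction m with
  | zero => intro _; rfl
  | succ k ih =>
    intro hm
    rw [List.range_succ, List.foldl_append, List.foldl_append, List.foldl_cons, List.foldl_cons,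
        List.foldl_nil, List.foldl_nil, ih (by omega)]
    have hpar : ((List.range hs.length).map (fun i => bFindParent hs (hs.getD i ("", 0)).2 i)).getD k none = bP hs k :=
      getD_map_range _ (by omega) none
    have ha : (match ((List.range hs.length).map (fun i => bFindParent hs (hs.getD i ("", 0)).2 i)).getD k none with
        | none => ([] : List String)
        | some p => ((List.range k).map (anc hs)).getD p [] ++ [(hs.getD p ("", 0)).1]) = anc hs k := by
      rw [hpar]
      rcases hb : bP hs k with _ | p
      · show ([] : List String) = anc hs k
        unfold anc; rw [hb]; simp [chainO]
      · have hp : p < k := bFindParent_lt hb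
        show ((List.range k).map (anc hs)).getD p [] ++ [(hs.getD p ("", 0)).1] = anc hs k
        rw [getD_map_range _ hp]
        unfold anc
        rw [hb]
        simp [chainO]
    rw [ha]
    refine Prod.ext ?_ ?_
    · dsimp only
      rw [List.map_append, List.map_cons, List.map_nil]
    · rfl

-- ===== VERDICT (by name: the statement is the Claim_ definition above) =====
theorem build_ancestry_stack_py_spec : Claim_equal_build_ancestry_stack_py := by
  intro hs _
  unfold Spec_build_ancestry_stack_py
  simp only [build_ancestry_stack_py, build_ancestry_stack_py_alt]
  rw [A_master, B_master hs hs.length (Nat.le_refl _)]
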